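-- pv_equiv track=rewrite | github.com/mflyn/lottery | scripts/find_top_ssq.py | passes_pattern_filters
-- ===== SOURCE A (Python) =====
-- from typing import List, Tuple, Dict, Any
--
-- def calc_ac_value(nums: List[int]) -> int:
--     s = sorted(nums)
--     diffs = set()
--     n = len(s)
--     for i in range(n):
--         for j in range(i + 1, n):
--             diffs.add(s[j] - s[i])
--     return len(diffs) - (n - 1)
--
-- def passes_pattern_filters(reds: Tuple[int, ...]) -> bool:
--     # 奇偶 2..4
--     odd = sum(1 for n in reds if n % 2)
--     if not (2 <= odd <= 4):
--         return False
--     # 大小 2..4 (大: >=18)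
--     big = sum(1 for n in reds if n >= 18)
--     if not (2 <= big <= 4):
--         return False
--     # 区间至少覆盖2个区（1-11,12-22,23-33）
--     z1 = sum(1 for n in reds if 1 <= n <= 11)
--     z2 = sum(1 for n in reds if 12 <= n <= 22)
--     z3 = sum(1 for n in reds if 23 <= n <= 33)
--     if (z1 > 0) + (z2 > 0) + (z3 > 0) < 2:
--         return False
--     # 跨度 10..32
--     span = max(reds) - min(reds)
--     if not (10 <= span <= 32):
--         return False
--     # 和值 70..150
--     s = sum(reds)
--     if not (70 <= s <= 150):
--         return False
--     # AC 值 >= 4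
--     if calc_ac_value(list(reds)) < 4:
--         return False
--     return True
-- ===== SOURCE B (Python) =====
-- from bisect import bisect_left
-- from typing import Tuple
--
--
-- def passes_pattern_filters(reds: Tuple[int, ...]) -> bool:
--     # odd count 2..4
--     odd = sum(1 for n in reds if n % 2)
--     if not (2 <= odd <= 4):
--         return False
--     # sort once; every remaining statistic is read off the sorted list
--     s = sorted(reds)
--     n = len(s)
--     # big count 2..4 via binary search for the first element >= 18
--     big = n - bisect_left(s, 18)
--     if not (2 <= big <= 4):
--         return False
--     # zone occupancy via binary-search boundaries
--     zones = ((bisect_left(s, 1) < bisect_left(s, 12))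
--              + (bisect_left(s, 12) < bisect_left(s, 23))
--              + (bisect_left(s, 23) < bisect_left(s, 34)))
--     if zones < 2:
--         return False
--     # span from the ends of the sorted list
--     span = s[-1] - s[0]
--     if not (10 <= span <= 32):
--         return False
--     total = sum(s)
--     if not (70 <= total <= 150):
--         return False
--     # AC value: scan the difference DOMAIN 1..span (span <= 32 here) instead of all O(n^2) pairs
--     vals = set(s)
--     distinct = sum(1 for d in range(1, span + 1) if any(x + d in vals for x in vals))
--     if n > len(vals):
--         distinct += 1  # duplicate values contribute the difference 0
--     return distinct - (n - 1) >= 4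
-- ===== Notes on version B (the rewrite author's own statement) =====
-- stated objective: alternative
-- what changed: B sorts reds once and reads every statistic off the sorted list (big and zone counts via bisect binary-search boundaries, span via the ends) and computes the AC value by scanning the difference domain 1..span with set lookups instead of A's O(n^2) loop over all index pairs.
import Mathlib
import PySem

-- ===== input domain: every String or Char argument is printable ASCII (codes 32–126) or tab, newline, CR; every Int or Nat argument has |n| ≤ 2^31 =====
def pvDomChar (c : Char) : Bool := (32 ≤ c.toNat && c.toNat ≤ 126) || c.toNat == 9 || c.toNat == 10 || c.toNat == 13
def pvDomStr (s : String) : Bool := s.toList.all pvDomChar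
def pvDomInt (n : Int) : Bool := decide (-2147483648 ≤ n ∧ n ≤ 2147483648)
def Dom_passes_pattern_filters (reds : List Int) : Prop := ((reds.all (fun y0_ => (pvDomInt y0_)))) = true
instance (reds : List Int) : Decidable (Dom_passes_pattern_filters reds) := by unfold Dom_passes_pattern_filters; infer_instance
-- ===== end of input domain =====

-- B sorts once and reads every statistic off the sorted list (binary-search boundaries for the
-- big/zone counts, ends of the list for the span) and computes the AC value by scanning the
-- difference DOMAIN 1..span instead of all O(n^2) index pairs (alternative decomposition).

-- ===== PORT A =====
def calc_ac_value (nums : List Int) : Int :=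
  let s := PySem.List.sorted nums (fun x => x) false
  let n : Int := s.length
  let diffs : PySem.Set Int :=
    (PySem.List.pyRange 0 n 1).foldl (fun d i =>
      (PySem.List.pyRange (i + 1) n 1).foldl (fun d j =>
        PySem.Set.add d (PySem.List.pyGetD s j 0 - PySem.List.pyGetD s i 0)) d)
      PySem.Set.empty
  (diffs.length : Int) - (n - 1)

def passes_pattern_filters (reds : List Int) : Bool :=
  let odd := (reds.map (fun n => if PySem.Int.mod n 2 ≠ 0 then (1 : Int) else 0)).sum
  if ¬ (2 ≤ odd ∧ odd ≤ 4) then false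
  else
    let big := (reds.map (fun n => if (18 : Int) ≤ n then (1 : Int) else 0)).sum
    if ¬ (2 ≤ big ∧ big ≤ 4) then false
    else
      let z1 := (reds.map (fun n => if 1 ≤ n ∧ n ≤ 11 then (1 : Int) else 0)).sum
      let z2 := (reds.map (fun n => if 12 ≤ n ∧ n ≤ 22 then (1 : Int) else 0)).sum
      let z3 := (reds.map (fun n => if 23 ≤ n ∧ n ≤ 33 then (1 : Int) else 0)).sum
      if ((if z1 > 0 then (1 : Int) else 0) + (if z2 > 0 then 1 else 0) + (if z3 > 0 then 1 else 0)) < 2 then false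
      else
        -- reds is provably nonempty here (odd ≥ 2), so the getD defaults are never used
        let span := ((PySem.List.max? reds (fun x => x)).getD 0) - ((PySem.List.min? reds (fun x => x)).getD 0)
        if ¬ (10 ≤ span ∧ span ≤ 32) then false
        else
          let s := reds.sum
          if ¬ (70 ≤ s ∧ s ≤ 150) then false
          else
            if calc_ac_value reds < 4 then false
            else true

-- ===== PORT B =====
def passes_pattern_filters_alt (reds : List Int) : Bool :=
  let odd := (reds.map (fun n => if PySem.Int.mod n 2 ≠ 0 then (1 : Int) else 0)).sum
  if ¬ (2 ≤ odd ∧ odd ≤ 4) then false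
  else
    let s := PySem.List.sorted reds (fun x => x) false
    let n : Int := s.length
    let big := n - (PySem.List.bisectLeft s 18 : Int)
    if ¬ (2 ≤ big ∧ big ≤ 4) then false
    else
      let zones : Int :=
        (if PySem.List.bisectLeft s 1 < PySem.List.bisectLeft s 12 then (1 : Int) else 0)
        + (if PySem.List.bisectLeft s 12 < PySem.List.bisectLeft s 23 then 1 else 0)
        + (if PySem.List.bisectLeft s 23 < PySem.List.bisectLeft s 34 then 1 else 0)
      if zones < 2 then false
      else
        let span := PySem.List.pyGetD s (-1) 0 - PySem.List.pyGetD s 0 0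
        if ¬ (10 ≤ span ∧ span ≤ 32) then false
        else
          let total := s.sum
          if ¬ (70 ≤ total ∧ total ≤ 150) then false
          else
            let vals : PySem.Set Int := PySem.Set.ofList s
            let distinct : Int :=
              ((PySem.List.pyRange 1 (span + 1) 1).filter
                (fun d => vals.any (fun x => PySem.Set.contains vals (x + d)))).length
            let distinct := if n > (vals.length : Int) then distinct + 1 else distinct
            decide (distinct - (n - 1) ≥ 4)

-- ===== PRECONDITION & SPEC =====
def Spec_passes_pattern_filters (reds : List Int) (out : Bool) : Prop := out = passes_pattern_filters_alt reds
instance (reds : List Int) (out : Bool) : Decidable (Spec_passes_pattern_filters reds out) := by unfold Spec_passes_pattern_filters; infer_instance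

-- ===== CLAIM =====
def Claim_equal_passes_pattern_filters : Prop := ∀ (reds : List Int), Dom_passes_pattern_filters reds → Spec_passes_pattern_filters reds (passes_pattern_filters reds)

-- ===== LEMMAS AND PROOFS =====

-- a 0/1 indicator sum over a Prop-conditioned ite is a countP (bridges the ports' ite spelling)
theorem sum_indicator (P : Int → Prop) [DecidablePred P] (l : List Int) :
    (l.map (fun n => if P n then (1 : Int) else 0)).sum = (l.countP (fun n => decide (P n)) : Int) := by
  induction l with
  | nil => simp
  | cons x t ih => by_cases h : P x <;> simp [List.countP_cons, h, ih] <;> omega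

theorem countP_lt_ge (l : List Int) (a : Int) :
    l.countP (fun y => decide (y < a)) + l.countP (fun y => decide (a ≤ y)) = l.length := by
  induction l with
  | nil => simp
  | cons x t ih =>
      rcases lt_or_ge x a with h | h
      · simp [List.countP_cons, h, not_le.mpr h, ih]; omega
      · simp [List.countP_cons, h, not_lt.mpr h, ih]; omega

theorem countP_lt_split (l : List Int) (a b : Int) (hab : a ≤ b) :
    l.countP (fun y => decide (y < b))
      = l.countP (fun y => decide (y < a)) + l.countP (fun y => decide (a ≤ y ∧ y < b)) := by
  induction l with
  | nil => simp
  | cons x t ih =>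
      rcases lt_or_ge x a with h1 | h1
      · have h2 : x < b := lt_of_lt_of_le h1 hab
        simp [List.countP_cons, h1, h2, not_le.mpr h1, ih]; omega
      · rcases lt_or_ge x b with h2 | h2
        · simp [List.countP_cons, h1, h2, not_lt.mpr h1, ih]; omega
        · simp [List.countP_cons, h1, not_lt.mpr h1, not_lt.mpr h2, ih]

theorem bisectLeft_countP (s : List Int) (x : Int) (hs : s.Pairwise (· ≤ ·)) :
    PySem.List.bisectLeft s x = s.countP (fun y => decide (y < x)) := by
  obtain ⟨hle, hlo, hhi⟩ := PySem.List.bisectLeft_spec s x hs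
  set k := PySem.List.bisectLeft s x with hk
  conv_rhs => rw [← List.take_append_drop k s]
  rw [List.countP_append]
  have h1 : List.countP (fun y => decide (y < x)) (List.take k s) = (List.take k s).length := by
    rw [List.countP_eq_length]
    intro a ha
    obtain ⟨j, hj, rfl⟩ := List.mem_iff_getElem.mp ha
    have hjk : j < k := lt_of_lt_of_le hj (by simp)
    have := hlo j (by omega) hjk
    simp_all [List.getElem_take]
  have h2 : List.countP (fun y => decide (y < x)) (List.drop k s) = 0 := by
    rw [List.countP_eq_zero]
    intro a ha
    obtain ⟨j, hj, rfl⟩ := List.mem_iff_getElem.mp ha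
    rw [List.getElem_drop]
    have hlen : k + j < s.length := by simp at hj; omega
    have := hhi (k + j) hlen (by omega)
    simp; omega
  rw [h1, h2, List.length_take]
  omega

theorem mem_foldl_foldl_add (l : List Int) (g : Int → List Int) (f : Int → Int → Int)
    (s : PySem.Set Int) (y : Int) :
    (y ∈ l.foldl (fun d i => (g i).foldl (fun d j => PySem.Set.add d (f i j)) d) s)
      ↔ y ∈ s ∨ ∃ i ∈ l, ∃ j ∈ g i, y = f i j := by
  induction l generalizing s with
  | nil => simp
  | cons a l ih =>
      rw [List.foldl_cons, ih, PySem.Set.mem_foldl_add]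
      constructor
      · rintro (( h | ⟨j, hj, rfl⟩) | ⟨i, hi, j, hj, rfl⟩)
        · exact Or.inl h
        · exact Or.inr ⟨a, by simp, j, hj, rfl⟩
        · exact Or.inr ⟨i, by simp [hi], j, hj, rfl⟩
      · rintro (h | ⟨i, hi, j, hj, rfl⟩)
        · exact Or.inl (Or.inl h)
        · rcases List.mem_cons.mp hi with rfl | hi
          · exact Or.inl (Or.inr ⟨j, hj, rfl⟩)
          · exact Or.inr ⟨i, hi, j, hj, rfl⟩

theorem nodup_foldl_foldl_add (l : List Int) (g : Int → List Int) (f : Int → Int → Int)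
    (s : PySem.Set Int) (h : s.Nodup) :
    (l.foldl (fun d i => (g i).foldl (fun d j => PySem.Set.add d (f i j)) d) s).Nodup := by
  induction l generalizing s with
  | nil => simpa using h
  | cons a l ih =>
      rw [List.foldl_cons]
      apply ih
      generalize g a = gl
      induction gl generalizing s with
      | nil => simpa using h
      | cons b gl ihb => exact ihb _ (PySem.Set.nodup_add _ _ h)

theorem ofList_length_lt_iff (s : List Int) :
    ((PySem.Set.ofList s).length < s.length) ↔ ¬ s.Nodup := by
  have hperm : (PySem.Set.ofList s).Perm s.dedup := by
    rw [List.perm_ext_iff_of_nodup (PySem.Set.nodup_ofList s) (List.nodup_dedup s)]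
    intro a; simp [PySem.Set.mem_ofList, List.mem_dedup]
  have hlen : (PySem.Set.ofList s).length = s.dedup.length := hperm.length_eq
  rw [hlen]
  constructor
  · intro hlt hnd
    rw [List.Nodup.dedup hnd] at hlt
    omega
  · intro hnd
    have hsub := List.dedup_sublist s
    have hle := hsub.length_le
    rcases lt_or_eq_of_le hle with h | h
    · exact h
    · have hde : s.dedup = s := hsub.eq_of_length h
      exact absurd (hde ▸ List.nodup_dedup s) hnd

theorem sorted_mono (s : List Int) (hp : s.Pairwise (· ≤ ·)) (p q : Nat) (hpq : p ≤ q)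
    (hq : q < s.length) : s[p]'(by omega) ≤ s[q]'hq := by
  rcases eq_or_lt_of_le hpq with rfl | h
  · exact le_refl _
  · exact List.pairwise_iff_getElem.mp hp p q (by omega) hq h

theorem mem_diffs_iff (s : List Int) (hp : s.Pairwise (· ≤ ·)) (hne : s ≠ []) (y : Int) :
    (∃ i, (0 ≤ i ∧ i < (s.length : Int)) ∧ ∃ j, (i + 1 ≤ j ∧ j < (s.length : Int)) ∧
        y = PySem.List.pyGetD s j 0 - PySem.List.pyGetD s i 0)
      ↔ ((1 ≤ y ∧ y < (PySem.List.pyGetD s (-1) 0 - PySem.List.pyGetD s 0 0) + 1)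
            ∧ ∃ x ∈ s, x + y ∈ s)
         ∨ (¬ s.Nodup ∧ y = 0) := by
  have hN : 0 < s.length := List.length_pos_iff.mpr hne
  have hlast : PySem.List.pyGetD s (-1) 0 = s[s.length - 1]'(by omega) := by
    rw [PySem.List.pyGetD_neg_one s 0 hne, List.getLast_eq_getElem]
  have hhead : PySem.List.pyGetD s 0 0 = s[0] := by
    rw [PySem.List.pyGetD_zero]; exact List.getD_eq_getElem s 0 hN
  constructor
  · rintro ⟨i, ⟨hi0, hiN⟩, j, ⟨hij, hjN⟩, rfl⟩
    have hj0 : (0 : Int) ≤ j := by omega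
    rw [PySem.List.pyGetD_eq_getElem s 0 hj0 hjN, PySem.List.pyGetD_eq_getElem s 0 hi0 hiN]
    have hab : i.toNat < j.toNat := by omega
    have hbN : j.toNat < s.length := by omega
    by_cases hd : s[i.toNat]'(by omega) = s[j.toNat]'hbN
    · right
      refine ⟨fun hnd => ?_, by omega⟩
      exact (List.pairwise_iff_getElem.mp hnd i.toNat j.toNat (by omega) hbN hab) hd
    · left
      have hle : s[i.toNat]'(by omega) ≤ s[j.toNat]'hbN := sorted_mono s hp _ _ (by omega) hbN
      have h1 : s[j.toNat]'hbN ≤ s[s.length - 1]'(by omega) := sorted_mono s hp _ _ (by omega) (by omega)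
      have h2 : s[0] ≤ s[i.toNat]'(by omega) := sorted_mono s hp _ _ (by omega) (by omega)
      refine ⟨⟨by omega, by rw [hlast, hhead]; omega⟩, s[i.toNat]'(by omega), List.getElem_mem _, ?_⟩
      have : s[i.toNat]'(by omega) + (s[j.toNat]'hbN - s[i.toNat]'(by omega)) = s[j.toNat]'hbN := by ring
      rw [this]; exact List.getElem_mem _
  · rintro (⟨⟨hy1, _⟩, x, hx, hxy⟩ | ⟨hnd, rfl⟩)
    · obtain ⟨a, ha, hae⟩ := List.mem_iff_getElem.mp hx
      obtain ⟨b, hb, hbe⟩ := List.mem_iff_getElem.mp hxy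
      have hab : a < b := by
        by_contra hcon
        push_neg at hcon
        have := sorted_mono s hp b a hcon ha
        omega
      refine ⟨(a : Int), ⟨by positivity, by exact_mod_cast ha⟩,
              (b : Int), ⟨by exact_mod_cast hab, by exact_mod_cast hb⟩, ?_⟩
      rw [PySem.List.pyGetD_eq_getElem s 0 (by positivity) (by exact_mod_cast hb),
          PySem.List.pyGetD_eq_getElem s 0 (by positivity) (by exact_mod_cast ha)]
      simp only [Int.toNat_natCast]
      omega
    · have h2 : ¬ ∀ (i j : Nat) (hi : i < s.length) (hj : j < s.length), i < j →
          s[i]'hi ≠ s[j]'hj := fun h => hnd (List.pairwise_iff_getElem.mpr h)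
      push_neg at h2
      obtain ⟨a, b, ha, hb, hab, heq⟩ := h2
      refine ⟨(a : Int), ⟨by positivity, by exact_mod_cast ha⟩,
              (b : Int), ⟨by exact_mod_cast hab, by exact_mod_cast hb⟩, ?_⟩
      rw [PySem.List.pyGetD_eq_getElem s 0 (by positivity) (by exact_mod_cast hb),
          PySem.List.pyGetD_eq_getElem s 0 (by positivity) (by exact_mod_cast ha)]
      simp only [Int.toNat_natCast]
      omega

theorem ac_eq (s : List Int) (hp : s.Pairwise (· ≤ ·)) (hne : s ≠ []) :
    (((PySem.List.pyRange 0 (s.length : Int) 1).foldl (fun d i =>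
        (PySem.List.pyRange (i + 1) (s.length : Int) 1).foldl (fun d j =>
          PySem.Set.add d (PySem.List.pyGetD s j 0 - PySem.List.pyGetD s i 0)) d)
        PySem.Set.empty).length : Int)
      = (((PySem.List.pyRange 1 ((PySem.List.pyGetD s (-1) 0 - PySem.List.pyGetD s 0 0) + 1) 1).filter
            (fun d => (PySem.Set.ofList s).any (fun x => PySem.Set.contains (PySem.Set.ofList s) (x + d)))).length : Int)
        + (if s.Nodup then 0 else 1) := by
  set A := (PySem.List.pyRange 0 (s.length : Int) 1).foldl (fun d i =>
        (PySem.List.pyRange (i + 1) (s.length : Int) 1).foldl (fun d j =>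
          PySem.Set.add d (PySem.List.pyGetD s j 0 - PySem.List.pyGetD s i 0)) d)
        PySem.Set.empty with hA
  set L := (PySem.List.pyRange 1 ((PySem.List.pyGetD s (-1) 0 - PySem.List.pyGetD s 0 0) + 1) 1).filter
            (fun d => (PySem.Set.ofList s).any (fun x => PySem.Set.contains (PySem.Set.ofList s) (x + d))) with hL
  have hAnd : A.Nodup := nodup_foldl_foldl_add _ _ _ _ List.nodup_nil
  have hLnd : L.Nodup := (PySem.List.nodup_pyRange_one _ _).filter _
  have hmemL : ∀ y : Int, y ∈ L ↔
      ((1 ≤ y ∧ y < (PySem.List.pyGetD s (-1) 0 - PySem.List.pyGetD s 0 0) + 1)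
        ∧ ∃ x ∈ s, x + y ∈ s) := by
    intro y
    rw [hL, List.mem_filter, PySem.List.mem_pyRange_one]
    simp [List.any_eq_true, PySem.Set.mem_ofList, and_assoc]
  have hmemA : ∀ y : Int, y ∈ A ↔
      (((1 ≤ y ∧ y < (PySem.List.pyGetD s (-1) 0 - PySem.List.pyGetD s 0 0) + 1)
            ∧ ∃ x ∈ s, x + y ∈ s)
         ∨ (¬ s.Nodup ∧ y = 0)) := by
    intro y
    rw [hA, mem_foldl_foldl_add]
    rw [← mem_diffs_iff s hp hne y]
    simp [PySem.Set.empty, PySem.List.mem_pyRange_one]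
  by_cases hnd : s.Nodup
  · have : A.Perm L := by
      rw [List.perm_ext_iff_of_nodup hAnd hLnd]
      intro y
      rw [hmemA y, hmemL y]
      simp [hnd]
    rw [this.length_eq]
    simp [hnd]
  · have h0L : (0 : Int) ∉ L := by
      intro h0
      have := (hmemL 0).mp h0
      omega
    have hMnd : (L ++ [0]).Nodup := by
      refine List.Nodup.append hLnd (by simp) ?_
      intro a ha hb
      simp only [List.mem_singleton] at hb
      subst hb
      exact h0L ha
    have : A.Perm (L ++ [0]) := by
      rw [List.perm_ext_iff_of_nodup hAnd hMnd]
      intro y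
      rw [hmemA y]
      simp only [List.mem_append, List.mem_singleton, hmemL y, hnd, not_false_iff, true_and]
    rw [this.length_eq]
    simp [hnd]

theorem maxA_eq (x : Int) (t : List Int) :
    ((PySem.List.max? (x :: t) (fun y => y)).getD 0)
      = PySem.List.pyGetD (PySem.List.sorted (x :: t) (fun y => y) false) (-1) 0 := by
  set s := PySem.List.sorted (x :: t) (fun y => y) false with hs
  have hne : s ≠ [] := by
    rw [hs, Ne, PySem.List.sorted_eq_nil_iff]; simp
  have hp : s.Pairwise (· ≤ ·) := by
    have := PySem.List.sorted_pairwise (x :: t) (fun y : Int => y)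
    simpa [hs] using this
  have hperm : s.Perm (x :: t) := PySem.List.sorted_perm _ _ _
  rw [PySem.List.max?_id_cons, Option.getD_some, PySem.List.pyGetD_neg_one s 0 hne]
  apply le_antisymm
  · have hmem : List.foldl max x t ∈ s := by
      rw [hperm.mem_iff]
      rcases PySem.List.foldl_max_mem t x with h | h
      · rw [h]; simp
      · simp [h]
    obtain ⟨p, hps, hpe⟩ := List.mem_iff_getElem.mp hmem
    rw [← hpe, List.getLast_eq_getElem]
    exact sorted_mono s hp p (s.length - 1) (by omega) (by omega)
  · have hmem : s.getLast hne ∈ (x :: t) := hperm.mem_iff.mp (List.getLast_mem hne)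
    rcases List.mem_cons.mp hmem with h | h
    · rw [h]; exact (PySem.List.le_foldl_max t x).1
    · exact (PySem.List.le_foldl_max t x).2 _ h

theorem minA_eq (x : Int) (t : List Int) :
    ((PySem.List.min? (x :: t) (fun y => y)).getD 0)
      = PySem.List.pyGetD (PySem.List.sorted (x :: t) (fun y => y) false) 0 0 := by
  set s := PySem.List.sorted (x :: t) (fun y => y) false with hs
  have hne : s ≠ [] := by
    rw [hs, Ne, PySem.List.sorted_eq_nil_iff]; simp
  have hN : 0 < s.length := List.length_pos_iff.mpr hne
  have hp : s.Pairwise (· ≤ ·) := by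
    have := PySem.List.sorted_pairwise (x :: t) (fun y : Int => y)
    simpa [hs] using this
  have hperm : s.Perm (x :: t) := PySem.List.sorted_perm _ _ _
  rw [PySem.List.min?_id_cons, Option.getD_some, PySem.List.pyGetD_zero,
      List.getD_eq_getElem s 0 hN]
  apply le_antisymm
  · have hmem : s[0] ∈ (x :: t) := hperm.mem_iff.mp (List.getElem_mem hN)
    rcases List.mem_cons.mp hmem with h | h
    · rw [h]; exact (PySem.List.foldl_min_le t x).1
    · exact (PySem.List.foldl_min_le t x).2 _ h
  · have hmem : List.foldl min x t ∈ s := by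
      rw [hperm.mem_iff]
      rcases PySem.List.foldl_min_mem t x with h | h
      · rw [h]; simp
      · simp [h]
    obtain ⟨p, hps, hpe⟩ := List.mem_iff_getElem.mp hmem
    rw [← hpe]
    exact sorted_mono s hp 0 p (by omega) hps

theorem main_cons (x : Int) (t : List Int) :
    passes_pattern_filters (x :: t) = passes_pattern_filters_alt (x :: t) := by
  have hne : PySem.List.sorted (x :: t) (fun y : Int => y) false ≠ [] := by
    rw [Ne, PySem.List.sorted_eq_nil_iff]; simp
  have hp : (PySem.List.sorted (x :: t) (fun y : Int => y) false).Pairwise (· ≤ ·) := by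
    have := PySem.List.sorted_pairwise (x :: t) (fun y : Int => y)
    simpa using this
  have hperm : (PySem.List.sorted (x :: t) (fun y : Int => y) false).Perm (x :: t) :=
    PySem.List.sorted_perm _ _ _
  -- big
  have e_big : (((PySem.List.sorted (x :: t) (fun y : Int => y) false).length : Int)
        - (PySem.List.bisectLeft (PySem.List.sorted (x :: t) (fun y : Int => y) false) 18 : Int))
      = ((x :: t).map (fun n => if (18 : Int) ≤ n then (1 : Int) else 0)).sum := by
    rw [sum_indicator, bisectLeft_countP _ 18 hp]
    have h1 := countP_lt_ge (PySem.List.sorted (x :: t) (fun y : Int => y) false) 18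
    have h2 := hperm.countP_eq (fun n => decide ((18 : Int) ≤ n))
    omega
  -- zones
  have e_zone : ∀ (a b c : Int), b = c + 1 → a ≤ c →
      (if PySem.List.bisectLeft (PySem.List.sorted (x :: t) (fun y : Int => y) false) a
            < PySem.List.bisectLeft (PySem.List.sorted (x :: t) (fun y : Int => y) false) b
        then (1 : Int) else 0)
      = (if ((x :: t).map (fun n => if a ≤ n ∧ n ≤ c then (1 : Int) else 0)).sum > 0
        then (1 : Int) else 0) := by
    intro a b c hbc hab
    subst hbc
    refine if_congr ?_ rfl rfl
    rw [sum_indicator, bisectLeft_countP _ a hp, bisectLeft_countP _ (c + 1) hp,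
        countP_lt_split _ a (c + 1) (by omega)]
    have h2 : (PySem.List.sorted (x :: t) (fun y : Int => y) false).countP
          (fun y => decide (a ≤ y ∧ y < c + 1))
        = (x :: t).countP (fun n => decide (a ≤ n ∧ n ≤ c)) := by
      rw [List.countP_congr (q := fun y => decide (a ≤ y ∧ y ≤ c))
            (by intro y _; simp only [decide_eq_true_eq]; omega)]
      exact hperm.countP_eq _
    omega
  have e_z1 := e_zone 1 12 11 (by norm_num) (by norm_num)
  have e_z2 := e_zone 12 23 22 (by norm_num) (by norm_num)
  have e_z3 := e_zone 23 34 33 (by norm_num) (by norm_num)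
  -- span / sum / dup
  have e_max := maxA_eq x t
  have e_min := minA_eq x t
  have e_sum : (PySem.List.sorted (x :: t) (fun y : Int => y) false).sum = (x :: t).sum :=
    hperm.sum_eq
  have e_dup : (((PySem.List.sorted (x :: t) (fun y : Int => y) false).length : Int)
        > ((PySem.Set.ofList (PySem.List.sorted (x :: t) (fun y : Int => y) false)).length : Int))
      = ¬ (PySem.List.sorted (x :: t) (fun y : Int => y) false).Nodup := by
    rw [eq_iff_iff, ← ofList_length_lt_iff]
    omega
  -- AC value
  have e_ac := ac_eq (PySem.List.sorted (x :: t) (fun y : Int => y) false) hp hne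
  have e_leaf : ∀ D : Int,
      D = (((PySem.List.pyRange 1
            ((PySem.List.pyGetD (PySem.List.sorted (x :: t) (fun y : Int => y) false) (-1) 0
              - PySem.List.pyGetD (PySem.List.sorted (x :: t) (fun y : Int => y) false) 0 0) + 1) 1).filter
            (fun d => (PySem.Set.ofList (PySem.List.sorted (x :: t) (fun y : Int => y) false)).any
              (fun x' => PySem.Set.contains (PySem.Set.ofList (PySem.List.sorted (x :: t) (fun y : Int => y) false)) (x' + d)))).length : Int) →
      ((if ¬ (PySem.List.sorted (x :: t) (fun y : Int => y) false).Nodup then D + 1 else D)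
        - (((PySem.List.sorted (x :: t) (fun y : Int => y) false).length : Int) - 1))
      = calc_ac_value (x :: t) := by
    intro D hD
    simp only [calc_ac_value]
    rw [e_ac, hD]
    by_cases hnd : (PySem.List.sorted (x :: t) (fun y : Int => y) false).Nodup <;>
      simp [hnd]
  simp only [passes_pattern_filters, passes_pattern_filters_alt]
  rw [e_big, e_z1, e_z2, e_z3, e_max, e_min, e_sum]
  simp only [e_dup]
  rw [e_leaf _ rfl]
  split_ifs <;> (try rfl) <;>
    (symm; simp only [decide_eq_false_iff_not, decide_eq_true_eq]; omega)

-- ===== VERDICT =====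
theorem passes_pattern_filters_spec : Claim_equal_passes_pattern_filters := by
  intro reds _
  unfold Spec_passes_pattern_filters
  match reds with
  | [] => decide
  | x :: t => exact main_cons x t
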